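-- pv_equiv track=rewrite | github.com/SamuelMR98/BYU_CPC | LucidProgrammingComp2024/tt.py | min_cost_for_training
-- ===== SOURCE A (Python) =====
-- def min_cost_for_training(days, costs):
--     dp = [0] * (days[-1] + 1)
--     days_set = set(days)
--
--     for i in range(1, len(dp)):
--         if i not in days_set:
--             dp[i] = dp[i-1]
--         else:
--             dp[i] = min(
--                 dp[max(0, i-1)] + costs[0],
--                 dp[max(0, i-7)] + costs[1],
--                 dp[max(0, i-30)] + costs[2]
--             )
--
--     return dp[-1]
-- ===== SOURCE B (Python) =====
-- def cnt(ds, x):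
--     # number of elements of the sorted list ds that are <= x (hand-rolled bisect_right)
--     lo, hi = 0, len(ds)
--     while lo < hi:
--         mid = (lo + hi) // 2
--         if ds[mid] <= x:
--             lo = mid + 1
--         else:
--             hi = mid
--     return lo
--
-- def min_cost_for_training(days, costs):
--     last = days[-1]
--     ds = sorted({d for d in days if 1 <= d <= last})
--     f = [0]
--     for d in ds:
--         f.append(min(f[cnt(ds, d - 1)] + costs[0],
--                      f[cnt(ds, d - 7)] + costs[1],
--                      f[cnt(ds, d - 30)] + costs[2]))
--     return f[-1]
-- ===== Notes on version B (the rewrite author's own statement) =====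
-- stated objective: alternative
-- what changed: B replaces A's DP over every day index from 1 to days[-1] (with a membership set) by a DP over the sorted distinct relevant days only, locating the 1/7/30-day look-back positions by binary search.
import Mathlib
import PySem

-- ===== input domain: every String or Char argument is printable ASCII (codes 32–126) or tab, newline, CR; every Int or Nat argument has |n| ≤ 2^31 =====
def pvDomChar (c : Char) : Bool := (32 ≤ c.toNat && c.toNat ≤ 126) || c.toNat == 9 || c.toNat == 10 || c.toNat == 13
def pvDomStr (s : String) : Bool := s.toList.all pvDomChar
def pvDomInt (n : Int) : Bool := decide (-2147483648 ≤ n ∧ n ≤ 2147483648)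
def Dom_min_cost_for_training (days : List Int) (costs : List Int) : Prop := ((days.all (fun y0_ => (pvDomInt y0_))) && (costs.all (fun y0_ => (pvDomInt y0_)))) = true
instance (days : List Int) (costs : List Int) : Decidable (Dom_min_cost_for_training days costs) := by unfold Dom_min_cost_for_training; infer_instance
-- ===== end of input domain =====

-- Alternative algorithm: A fills a dp array entry for every day index up to days[-1]; B runs the same
-- DP over the sorted distinct relevant training days only, binary-searching the 1/7/30-day look-backs.
-- Neither function mutates its arguments; the equivalence is about the return value.

-- ===== PORT A =====
-- Python's dp[i] = v / dp[j] reads inside the loop use only indices 0 ≤ j ≤ i < len(dp)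
-- (i ranges over 1..len(dp)-1, the read indices are i-1 or max(0, i-k) with i ≥ 1), so Nat
-- indexing via .toNat is exact there; dp[-1] at the end is PySem.List.pyGetD.
def aStep (daysSet : PySem.Set Int) (costs : List Int) (dp : Array Int) (i : Int) : Array Int :=
  if !(PySem.Set.contains daysSet i) then
    dp.setIfInBounds i.toNat (dp.getD (i - 1).toNat 0)
  else
    dp.setIfInBounds i.toNat (min (min
      (dp.getD (max 0 (i - 1)).toNat 0 + PySem.List.pyGetD costs 0 0)
      (dp.getD (max 0 (i - 7)).toNat 0 + PySem.List.pyGetD costs 1 0))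
      (dp.getD (max 0 (i - 30)).toNat 0 + PySem.List.pyGetD costs 2 0))

def min_cost_for_training (days : List Int) (costs : List Int) : Int :=
  let dp0 : Array Int := Array.replicate (PySem.List.pyGetD days (-1) 0 + 1).toNat 0
  let daysSet : PySem.Set Int := PySem.Set.ofList days
  let dp := (PySem.List.pyRange 1 (dp0.size : Int) 1).foldl (aStep daysSet costs) dp0
  PySem.List.pyGetD dp.toList (-1) 0

-- ===== PORT B =====
-- Source B's hand-written bisect_right loop 'while lo < hi: ...'; lo/hi stay in [0, len(ds)], so Nat
-- indices and Nat division are exact for Python's nonnegative lo, hi and (lo+hi)//2, and ds[mid]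
-- (mid < hi <= len(ds)) never raises, so getD is exact.
def cntAux (ds : List Int) (x : Int) (lo hi : Nat) : Nat :=
  if lo < hi then
    let mid := (lo + hi) / 2
    if ds.getD mid 0 ≤ x then cntAux ds x (mid + 1) hi
    else cntAux ds x lo mid
  else lo
termination_by hi - lo
decreasing_by all_goals omega

def cnt (ds : List Int) (x : Int) : Int := (cntAux ds x 0 ds.length : Int)

def bStep (ds : List Int) (costs : List Int) (f : List Int) (d : Int) : List Int :=
  f ++ [min (min (PySem.List.pyGetD f (cnt ds (d - 1)) 0 + PySem.List.pyGetD costs 0 0)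
                 (PySem.List.pyGetD f (cnt ds (d - 7)) 0 + PySem.List.pyGetD costs 1 0))
            (PySem.List.pyGetD f (cnt ds (d - 30)) 0 + PySem.List.pyGetD costs 2 0)]

def min_cost_for_training_alt (days : List Int) (costs : List Int) : Int :=
  let last := PySem.List.pyGetD days (-1) 0
  let ds := PySem.List.sorted
    (PySem.Set.ofList (days.filter (fun d => decide (1 ≤ d ∧ d ≤ last)))) (fun x => x) false
  let f := ds.foldl (bStep ds costs) [0]
  PySem.List.pyGetD f (-1) 0

-- ===== PRECONDITION & SPEC =====
-- Pre_ excludes exactly the inputs where the Python A raises IndexError: an empty days list,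
-- a negative last day (dp becomes empty and dp[-1] raises), and a costs list shorter than 3
-- when some day d with 1 <= d <= days[-1] exists (costs[0..2] are then read).
def Pre_min_cost_for_training (days : List Int) (costs : List Int) : Prop :=
  days ≠ [] ∧ 0 ≤ PySem.List.pyGetD days (-1) 0 ∧
    (3 ≤ costs.length ∨ ∀ d ∈ days, ¬ (1 ≤ d ∧ d ≤ PySem.List.pyGetD days (-1) 0))
instance (days : List Int) (costs : List Int) : Decidable (Pre_min_cost_for_training days costs) := by
  unfold Pre_min_cost_for_training; infer_instance

def pvWitness_min_cost_for_training : List Int × List Int := ([1, 3, 8], [2, 7, 25])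

def Spec_min_cost_for_training (days : List Int) (costs : List Int) (out : Int) : Prop :=
  out = min_cost_for_training_alt days costs
instance (days : List Int) (costs : List Int) (out : Int) : Decidable (Spec_min_cost_for_training days costs out) := by
  unfold Spec_min_cost_for_training; infer_instance

-- ===== CLAIM (what is proved, stated in full; the proofs are below) =====
def Claim_equal_min_cost_for_training : Prop := ∀ (days : List Int) (costs : List Int), Dom_min_cost_for_training days costs → Pre_min_cost_for_training days costs → Spec_min_cost_for_training days costs (min_cost_for_training days costs)
-- ===== LEMMAS AND PROOFS =====

-- cntF is the specification of Source B's binary search: the number of elements of ds that are ≤ x.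
def cntF (ds : List Int) (x : Int) : Int :=
  ((ds.filter (fun v => decide (v ≤ x))).length : Int)

-- G is the mathematical day-indexed DP both programs compute: G i = the dp value A stores at day i.
def G (days : List Int) (c0 c1 c2 : Int) : Nat → Int
  | 0 => 0
  | i + 1 =>
    if ((i : Int) + 1) ∈ days then
      min (min (G days c0 c1 c2 i + c0) (G days c0 c1 c2 (i - 6) + c1))
          (G days c0 c1 c2 (i - 29) + c2)
    else G days c0 c1 c2 i

-- dayAt ds t = the day whose G-value B's f-list stores at position t (0 for the sentinel f[0]).
def dayAt (ds : List Int) (t : Nat) : Int := if t = 0 then 0 else ds.getD (t - 1) 0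

lemma getL (N : Nat) (f : Nat → Int) (k : Nat) (hk : k < N) :
    PySem.List.pyGetD ((List.range N).map f) ((k : Nat) : Int) 0 = f k := by
  rw [PySem.List.pyGetD_natCast, PySem.List.getD_map_range _ _ _ _ hk]

lemma filter_le_getElem (ds : List Int) (hsort : ds.Pairwise (· < ·)) (j : Nat) (hj : j < ds.length) :
    ds.filter (fun v => decide (v ≤ ds[j])) = ds.take (j + 1) := by
  induction ds generalizing j with
  | nil => simp at hj
  | cons a tl ih =>
    rcases List.pairwise_cons.mp hsort with ⟨ha, htl⟩
    cases j with
    | zero =>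
      simp only [List.getElem_cons_zero, List.take_succ_cons, List.take_zero]
      rw [List.filter_cons_of_pos (by simp)]
      rw [List.filter_eq_nil_iff.mpr (fun v hv => by have := ha v hv; simp; omega)]
    | succ j =>
      simp only [List.getElem_cons_succ, List.take_succ_cons]
      rw [List.filter_cons_of_pos (by simp; exact le_of_lt (ha _ (List.getElem_mem _)))]
      exact congrArg (List.cons a) (ih htl j (by simpa using hj))

lemma filter_le_getElem_sub (ds : List Int) (hsort : ds.Pairwise (· < ·)) (j : Nat) (hj : j < ds.length) :
    ds.filter (fun v => decide (v ≤ ds[j] - 1)) = ds.take j := by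
  induction ds generalizing j with
  | nil => simp at hj
  | cons a tl ih =>
    rcases List.pairwise_cons.mp hsort with ⟨ha, htl⟩
    cases j with
    | zero =>
      simp only [List.getElem_cons_zero, List.take_zero]
      rw [List.filter_cons_of_neg (by simp)]
      rw [List.filter_eq_nil_iff.mpr (fun v hv => by have := ha v hv; simp; omega)]
    | succ j =>
      simp only [List.getElem_cons_succ, List.take_succ_cons]
      rw [List.filter_cons_of_pos (by have := ha _ (List.getElem_mem (by simpa using hj)); simp; omega)]
      exact congrArg (List.cons a) (ih htl j (by simpa using hj))

lemma cntF_nonpos (ds : List Int) (h1 : ∀ d ∈ ds, 1 ≤ d) (x : Int) (hx : x ≤ 0) : cntF ds x = 0 := by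
  unfold cntF
  rw [List.filter_eq_nil_iff.mpr (fun v hv => by have := h1 v hv; simp; omega)]
  rfl

lemma flat_nat (days : List Int) (c0 c1 c2 last : Int) (ds : List Int)
    (hsort : ds.Pairwise (· < ·))
    (hmem : ∀ d, d ∈ ds ↔ d ∈ days ∧ 1 ≤ d ∧ d ≤ last) :
    ∀ n : Nat, (n : Int) ≤ last →
      G days c0 c1 c2 n = G days c0 c1 c2 ((dayAt ds (cntF ds (n : Int)).toNat).toNat) := by
  have h1 : ∀ d ∈ ds, 1 ≤ d := fun d hd => ((hmem d).mp hd).2.1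
  intro n
  induction n with
  | zero =>
    intro _
    push_cast
    rw [cntF_nonpos ds h1 0 le_rfl]
    simp [dayAt]
  | succ n ih =>
    intro hle
    by_cases hx : ((n : Int) + 1) ∈ ds
    · obtain ⟨j, hj, hds⟩ := List.getElem_of_mem hx
      have hc : cntF ds ((n : Int) + 1) = (j + 1 : Nat) := by
        unfold cntF
        rw [show ((n : Int) + 1) = ds[j] from hds.symm, filter_le_getElem ds hsort j hj]
        simp [List.length_take]
        omega
      push_cast
      rw [hc]
      have hd : dayAt ds (((j + 1 : Nat) : Int)).toNat = (n : Int) + 1 := by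
        simp only [Int.toNat_natCast, dayAt, if_neg (Nat.succ_ne_zero j), Nat.add_sub_cancel]
        rw [List.getD_eq_getElem ds 0 hj, hds]
      rw [hd]
      congr 1
    · have hnd : ((n : Int) + 1) ∉ days := fun hd => hx ((hmem _).mpr ⟨hd, by omega, by push_cast; omega⟩)
      have hG : G days c0 c1 c2 (n + 1) = G days c0 c1 c2 n := by
        simp only [G, if_neg hnd]
      have hc : cntF ds ((n : Int) + 1) = cntF ds (n : Int) := by
        unfold cntF
        congr 1
        refine congrArg _ (List.filter_congr (fun v hv => ?_))
        have : v ≠ (n : Int) + 1 := fun h => hx (h ▸ hv)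
        simp only [decide_eq_decide]
        omega
      push_cast
      rw [hG, hc, ih (by omega)]

lemma flat_int (days : List Int) (c0 c1 c2 last : Int) (ds : List Int)
    (hsort : ds.Pairwise (· < ·))
    (hmem : ∀ d, d ∈ ds ↔ d ∈ days ∧ 1 ≤ d ∧ d ≤ last) :
    ∀ x : Int, x ≤ last →
      G days c0 c1 c2 x.toNat = G days c0 c1 c2 ((dayAt ds (cntF ds x).toNat).toNat) := by
  intro x hx
  by_cases h0 : x ≤ 0
  · rw [cntF_nonpos ds (fun d hd => ((hmem d).mp hd).2.1) x h0]
    have : x.toNat = 0 := by omega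
    rw [this]
    simp [dayAt]
  · push_neg at h0
    have hxx : x = ((x.toNat : Nat) : Int) := by omega
    rw [hxx]
    exact flat_nat days c0 c1 c2 last ds hsort hmem x.toNat (by omega)

lemma cntF_le_cntF (ds : List Int) (x y : Int) (hxy : x ≤ y) :
    (ds.filter (fun v => decide (v ≤ x))).length ≤ (ds.filter (fun v => decide (v ≤ y))).length := by
  rw [← List.countP_eq_length_filter, ← List.countP_eq_length_filter]
  exact List.countP_mono_left (fun a _ ha => by simp at ha ⊢; omega)

lemma arr_getD (a : Array Int) (i : Nat) (d : Int) : a.getD i d = a.toList.getD i d := by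
  simp [Array.getD, List.getD]
  split
  · rw [Array.getElem?_eq_getElem ‹i < a.size›]; rfl
  · rw [Array.getElem?_eq_none (by omega : a.size ≤ i)]; rfl

lemma A_loop (days costs : List Int) (N : Nat) (m : Nat) (h1 : 1 ≤ m) (hm : m ≤ N) :
    ((PySem.List.pyRange 1 (m : Int) 1).foldl (aStep (PySem.Set.ofList days) costs) (Array.replicate N 0)).toList
      = (List.range N).map (fun k => if k < m then
          G days (PySem.List.pyGetD costs 0 0) (PySem.List.pyGetD costs 1 0) (PySem.List.pyGetD costs 2 0) k
        else 0) := by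
  induction m, h1 using Nat.le_induction with
  | base =>
    simp only [Nat.cast_one]
    rw [PySem.List.pyRange_one_eq_nil le_rfl, List.foldl_nil]
    rw [List.map_congr_left (g := fun _ => (0:Int)) (fun k _ => by
      split
      · have : k = 0 := by omega
        simp [this, G]
      · rfl)]
    simp [List.map_const']
  | succ m h1 ih =>
    have hmN : m < N := by omega
    have ihe := ih (by omega)
    push_cast
    rw [PySem.List.pyRange_one_succ_right (by exact_mod_cast h1), List.foldl_append, List.foldl_cons,
        List.foldl_nil]
    set c0 := PySem.List.pyGetD costs 0 0
    set c1 := PySem.List.pyGetD costs 1 0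
    set c2 := PySem.List.pyGetD costs 2 0
    set f := fun k => if k < m then G days c0 c1 c2 k else 0 with hf
    set g := fun k => if k < m + 1 then G days c0 c1 c2 k else 0 with hg
    set A := (PySem.List.pyRange 1 (m : Int) 1).foldl (aStep (PySem.Set.ofList days) costs)
      (Array.replicate N 0) with hA
    have e1 : (max 0 ((m:Int) - 1)).toNat = m - 1 := by omega
    have e7 : (max 0 ((m:Int) - 7)).toNat = m - 7 := by omega
    have e30 : (max 0 ((m:Int) - 30)).toNat = m - 30 := by omega
    have e1' : ((m:Int) - 1).toNat = m - 1 := by omega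
    have em : ((m:Int)).toNat = m := by omega
    have hget : ∀ k : Nat, k < m → A.getD k 0 = G days c0 c1 c2 k := by
      intro k hk
      rw [arr_getD, ihe, PySem.List.getD_map_range _ _ _ _ (by omega)]
      simp [hf, hk]
    have hGm : G days c0 c1 c2 m =
        if ((m : Int)) ∈ days then
          min (min (G days c0 c1 c2 (m-1) + c0) (G days c0 c1 c2 (m-7) + c1))
              (G days c0 c1 c2 (m-30) + c2)
        else G days c0 c1 c2 (m-1) := by
      obtain ⟨i, rfl⟩ : ∃ i, m = i + 1 := ⟨m - 1, by omega⟩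
      show G days c0 c1 c2 (i+1) = _
      simp only [G]
      norm_num
      congr 2 <;> omega
    have hset : ∀ v : Int, v = G days c0 c1 c2 m →
        A.toList.set m v = (List.range N).map g := by
      intro v hv
      rw [ihe]
      apply List.ext_getElem
      · simp
      · intro k hk1 hk2
        simp only [List.length_set, List.length_map, List.length_range] at hk1
        rw [List.getElem_set]
        by_cases hkm : m = k
        · subst hkm
          simp only [List.getElem_map, List.getElem_range, hg, hv]
          simp
        · simp only [if_neg hkm, List.getElem_map, List.getElem_range, hf, hg]
          have : k < m ↔ k < m + 1 := by omega
          simp [this]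
    unfold aStep
    simp only [PySem.Set.contains_eq_listContains]
    by_cases hmem : ((m:Int)) ∈ days
    · rw [if_neg (by simp [hmem])]
      rw [Array.toList_setIfInBounds, em]
      apply hset
      rw [e1, e7, e30, hget (m-1) (by omega), hget (m-7) (by omega), hget (m-30) (by omega),
          hGm, if_pos hmem]
    · rw [if_pos (by simp [hmem])]
      rw [Array.toList_setIfInBounds, em]
      apply hset
      rw [e1', hget (m-1) (by omega), hGm, if_neg hmem]
lemma A_eq_G (days costs : List Int) (h : days ≠ []) (hl : 0 ≤ PySem.List.pyGetD days (-1) 0) :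
    min_cost_for_training days costs =
      G days (PySem.List.pyGetD costs 0 0) (PySem.List.pyGetD costs 1 0) (PySem.List.pyGetD costs 2 0)
        (PySem.List.pyGetD days (-1) 0).toNat := by
  unfold min_cost_for_training
  dsimp only
  set last := PySem.List.pyGetD days (-1) 0 with hlast
  set N := (last + 1).toNat with hN
  have hN1 : 1 ≤ N := by omega
  simp only [Array.size_replicate]
  rw [A_loop days costs N N hN1 le_rfl]
  set f := fun k => if k < N then
    G days (PySem.List.pyGetD costs 0 0) (PySem.List.pyGetD costs 1 0) (PySem.List.pyGetD costs 2 0) k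
    else 0 with hf
  have hne : (List.range N).map f ≠ [] := by simp; omega
  rw [PySem.List.pyGetD_neg_one (xs := List.map f (List.range N)) (d := 0) hne]
  rw [List.getLast_eq_getElem]
  simp only [List.length_map, List.length_range, List.getElem_map, List.getElem_range]
  rw [hf]
  simp only [if_pos (by omega : N - 1 < N)]
  congr 1
  omega
lemma cntF_char (ds : List Int) (hsort : ds.Pairwise (· < ·)) (x : Int) :
    ∀ i (hi : i < ds.length), ds[i] ≤ x ↔ i < (ds.filter (fun v => decide (v ≤ x))).length := by
  intro i hi
  constructor
  · intro h
    have hself : (ds.take (i + 1)).filter (fun v => decide (v ≤ x)) = ds.take (i + 1) := by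
      apply List.filter_eq_self.mpr
      intro a ha
      obtain ⟨j, hj, hja⟩ := List.mem_take_iff_getElem.mp ha
      have hji : j ≤ i := by omega
      have : ds[j] ≤ ds[i] := by
        rcases Nat.lt_or_ge j i with hlt | hge
        · exact le_of_lt (List.pairwise_iff_getElem.mp hsort j i (by omega) hi hlt)
        · have : j = i := by omega
          simp [this]
      simp only [decide_eq_true_eq]
      omega
    have hsplit : ds.filter (fun v => decide (v ≤ x)) =
        (ds.take (i + 1)).filter (fun v => decide (v ≤ x)) ++ (ds.drop (i + 1)).filter (fun v => decide (v ≤ x)) := by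
      rw [← List.filter_append, List.take_append_drop]
    have : i + 1 ≤ (ds.filter (fun v => decide (v ≤ x))).length := by
      rw [hsplit, List.length_append, hself, List.length_take]
      omega
    omega
  · intro h
    by_contra hnot
    have hnil : (ds.drop i).filter (fun v => decide (v ≤ x)) = [] := by
      apply List.filter_eq_nil_iff.mpr
      intro a ha
      obtain ⟨j, hj, hja⟩ := List.mem_drop_iff_getElem.mp ha
      have : ds[i] ≤ ds[i + j] := by
        rcases Nat.eq_zero_or_pos j with rfl | hjpos
        · simp
        · exact le_of_lt (List.pairwise_iff_getElem.mp hsort i (i + j) hi (by omega) (by omega))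
      rw [hja] at this
      simp only [decide_eq_true_eq]
      omega
    have hsplit : ds.filter (fun v => decide (v ≤ x)) =
        (ds.take i).filter (fun v => decide (v ≤ x)) ++ (ds.drop i).filter (fun v => decide (v ≤ x)) := by
      rw [← List.filter_append, List.take_append_drop]
    have : (ds.filter (fun v => decide (v ≤ x))).length ≤ i := by
      rw [hsplit, List.length_append, hnil]
      have := List.length_filter_le (fun v => decide (v ≤ x)) (ds.take i)
      simp only [List.length_nil, List.length_take] at *
      omega
    omega

lemma cntAux_eq (ds : List Int) (x : Int) (k : Nat)
    (hk : ∀ i (hi : i < ds.length), ds[i] ≤ x ↔ i < k) (hklen : k ≤ ds.length) :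
    ∀ n lo hi, hi - lo = n → lo ≤ k → k ≤ hi → hi ≤ ds.length → cntAux ds x lo hi = k := by
  intro n
  induction n using Nat.strong_induction_on with
  | _ n ih =>
    intro lo hi hn hlok hkhi hhil
    rw [cntAux]
    by_cases hlh : lo < hi
    · rw [if_pos hlh]
      dsimp only
      have hmid1 : lo ≤ (lo + hi) / 2 := by omega
      have hmid2 : (lo + hi) / 2 < hi := by omega
      rw [List.getD_eq_getElem ds 0 (by omega : (lo + hi) / 2 < ds.length)]
      by_cases hcmp : ds[(lo + hi) / 2] ≤ x
      · rw [if_pos hcmp]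
        have hlt : (lo + hi) / 2 < k := (hk _ (by omega)).mp hcmp
        exact ih (hi - ((lo + hi) / 2 + 1)) (by omega) _ _ rfl (by omega) hkhi hhil
      · rw [if_neg hcmp]
        have hge : k ≤ (lo + hi) / 2 := by
          by_contra hh
          exact hcmp ((hk _ (by omega)).mpr (by omega))
        exact ih ((lo + hi) / 2 - lo) (by omega) _ _ rfl hlok hge (by omega)
    · rw [if_neg hlh]
      omega

lemma cnt_eq_cntF (ds : List Int) (hsort : ds.Pairwise (· < ·)) (x : Int) :
    cnt ds x = cntF ds x := by
  unfold cnt cntF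
  congr 1
  exact cntAux_eq ds x _ (fun i hi => cntF_char ds hsort x i hi)
    (List.length_filter_le _ _) ds.length 0 ds.length rfl (by omega) (List.length_filter_le _ _) le_rfl


lemma B_loop (days costs : List Int) (last : Int) (ds : List Int)
    (hsort : ds.Pairwise (· < ·))
    (hmem : ∀ d, d ∈ ds ↔ d ∈ days ∧ 1 ≤ d ∧ d ≤ last) :
    ∀ j, j ≤ ds.length → (ds.take j).foldl (bStep ds costs) [0]
      = (List.range (j + 1)).map (fun t =>
          G days (PySem.List.pyGetD costs 0 0) (PySem.List.pyGetD costs 1 0) (PySem.List.pyGetD costs 2 0)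
            ((dayAt ds t).toNat)) := by
  set c0 := PySem.List.pyGetD costs 0 0
  set c1 := PySem.List.pyGetD costs 1 0
  set c2 := PySem.List.pyGetD costs 2 0
  set g := fun t => G days c0 c1 c2 ((dayAt ds t).toNat) with hg
  intro j
  induction j with
  | zero =>
    intro _
    simp [List.range_succ, hg, dayAt, G]
  | succ j ih =>
    intro hj1
    have hj : j < ds.length := by omega
    rw [List.take_add_one, List.getElem?_eq_getElem hj]
    simp only [Option.toList_some]
    rw [List.foldl_append, List.foldl_cons, List.foldl_nil, ih (by omega)]
    set d := ds[j] with hd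
    have hdm : d ∈ ds := by rw [hd]; exact List.getElem_mem hj
    obtain ⟨hdays, hd1, hdl⟩ := (hmem d).mp hdm
    -- counts
    have hc1 : cntF ds (d - 1) = ((j : Nat) : Int) := by
      unfold cntF
      rw [filter_le_getElem_sub ds hsort j hj]
      simp [List.length_take]
      omega
    have hc1n : (ds.filter (fun v => decide (v ≤ d - 1))).length = j := by
      have := hc1; unfold cntF at this; exact_mod_cast this
    have hle7 : (ds.filter (fun v => decide (v ≤ d - 7))).length ≤ j :=
      hc1n ▸ cntF_le_cntF ds (d - 7) (d - 1) (by omega)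
    have hle30 : (ds.filter (fun v => decide (v ≤ d - 30))).length ≤ j :=
      hc1n ▸ cntF_le_cntF ds (d - 30) (d - 1) (by omega)
    -- lookups into f_j
    have hlook : ∀ x : Int, (ds.filter (fun v => decide (v ≤ x))).length ≤ j →
        PySem.List.pyGetD ((List.range (j + 1)).map g) (cntF ds x) 0
          = G days c0 c1 c2 ((dayAt ds ((cntF ds x).toNat)).toNat) := by
      intro x hxle
      unfold cntF
      rw [getL (j + 1) g _ (by omega)]
      simp [hg]
    -- the appended value is G d.toNat
    have hval :
        min (min (G days c0 c1 c2 ((dayAt ds ((cntF ds (d-1)).toNat)).toNat) + c0)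
                 (G days c0 c1 c2 ((dayAt ds ((cntF ds (d-7)).toNat)).toNat) + c1))
            (G days c0 c1 c2 ((dayAt ds ((cntF ds (d-30)).toNat)).toNat) + c2)
          = G days c0 c1 c2 d.toNat := by
      rw [← flat_int days c0 c1 c2 last ds hsort hmem (d-1) (by omega),
          ← flat_int days c0 c1 c2 last ds hsort hmem (d-7) (by omega),
          ← flat_int days c0 c1 c2 last ds hsort hmem (d-30) (by omega)]
      obtain ⟨i, hi⟩ : ∃ i : Nat, d.toNat = i + 1 := ⟨(d-1).toNat, by omega⟩
      rw [hi]
      show _ = G days c0 c1 c2 (i+1)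
      simp only [G]
      rw [if_pos (show ((i : Int) + 1) ∈ days from by
        rw [show ((i : Int) + 1) = d from by omega]; exact hdays)]
      have e1 : (d - 1).toNat = i := by omega
      have e7 : (d - 7).toNat = i - 6 := by omega
      have e30 : (d - 30).toNat = i - 29 := by omega
      rw [e1, e7, e30]
    unfold bStep
    rw [cnt_eq_cntF ds hsort (d - 1), cnt_eq_cntF ds hsort (d - 7), cnt_eq_cntF ds hsort (d - 30)]
    rw [hlook (d - 1) (le_of_eq hc1n), hlook (d - 7) hle7, hlook (d - 30) hle30, hval]
    conv_rhs => rw [List.range_succ, List.map_append]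
    congr 1
    simp only [List.map_cons, List.map_nil, hg]
    have : dayAt ds (j + 1) = d := by
      simp only [dayAt, if_neg (Nat.succ_ne_zero j), Nat.add_sub_cancel]
      rw [List.getD_eq_getElem ds 0 hj]
    rw [this]

lemma B_eq_G (days costs : List Int) (h : days ≠ []) (hl : 0 ≤ PySem.List.pyGetD days (-1) 0) :
    min_cost_for_training_alt days costs =
      G days (PySem.List.pyGetD costs 0 0) (PySem.List.pyGetD costs 1 0) (PySem.List.pyGetD costs 2 0)
        (PySem.List.pyGetD days (-1) 0).toNat := by
  unfold min_cost_for_training_alt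
  dsimp only
  set last := PySem.List.pyGetD days (-1) 0 with hlast
  have hlmem : last ∈ days := by
    rw [hlast, PySem.List.pyGetD_neg_one days 0 h]
    exact List.getLast_mem h
  set ds := PySem.List.sorted
    (PySem.Set.ofList (days.filter (fun d => decide (1 ≤ d ∧ d ≤ last)))) (fun x => x) false with hds
  have hmem : ∀ d, d ∈ ds ↔ d ∈ days ∧ 1 ≤ d ∧ d ≤ last := by
    intro d
    rw [hds, PySem.List.mem_sorted, PySem.Set.mem_ofList, List.mem_filter]
    simp
  have hnodup : ds.Nodup := by
    rw [hds]
    exact (PySem.List.sorted_perm _ _ _).nodup_iff.mpr (PySem.Set.nodup_ofList _)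
  have hple : ds.Pairwise (· ≤ ·) := by
    rw [hds]
    exact PySem.List.sorted_pairwise _ _
  have hsort : ds.Pairwise (· < ·) :=
    (List.pairwise_and_iff.mpr ⟨hple, hnodup⟩).imp (fun hab => lt_of_le_of_ne hab.1 hab.2)
  rw [show ds.foldl (bStep ds costs) [0] = (ds.take ds.length).foldl (bStep ds costs) [0] by
        rw [List.take_length],
      B_loop days costs last ds hsort hmem ds.length le_rfl]
  set c0 := PySem.List.pyGetD costs 0 0
  set c1 := PySem.List.pyGetD costs 1 0
  set c2 := PySem.List.pyGetD costs 2 0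
  set g := fun t => G days c0 c1 c2 ((dayAt ds t).toNat) with hg
  have hne : (List.range (ds.length + 1)).map g ≠ [] := by simp
  rw [PySem.List.pyGetD_neg_one (xs := (List.range (ds.length + 1)).map g) (d := 0) hne,
      List.getLast_eq_getElem]
  simp only [List.length_map, List.length_range, List.getElem_map, List.getElem_range]
  have hidx : ds.length + 1 - 1 = ds.length := by omega
  rw [hidx, hg]
  show G days c0 c1 c2 (dayAt ds ds.length).toNat = G days c0 c1 c2 last.toNat
  rcases List.eq_nil_or_concat ds with hnil | ⟨l0, b0, hcat⟩
  · -- no relevant day: last must be 0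
    have hlast0 : last = 0 := by
      by_cases h1 : 1 ≤ last
      · exact absurd ((hmem last).mpr ⟨hlmem, h1, le_rfl⟩) (by rw [hnil]; simp)
      · omega
    rw [hnil, hlast0]
    simp [dayAt]
  · have hlen : 0 < ds.length := by
      rw [hcat]; simp
    have h1last : 1 ≤ last := by
      have hmem0 := (hmem ds[0]).mp (List.getElem_mem hlen)
      omega
    have hlast_mem : last ∈ ds := (hmem last).mpr ⟨hlmem, h1last, le_rfl⟩
    have htop : ds[ds.length - 1]'(by omega) = last := by
      obtain ⟨j, hj, hjv⟩ := List.getElem_of_mem hlast_mem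
      rcases Nat.lt_or_ge j (ds.length - 1) with hlt | hge
      · have hlt2 : ds[j] < ds[ds.length - 1]'(by omega) :=
          List.pairwise_iff_getElem.mp hsort j (ds.length - 1) hj (by omega) hlt
        have : ds[ds.length - 1]'(by omega) ≤ last :=
          ((hmem _).mp (List.getElem_mem (by omega))).2.2
        omega
      · obtain rfl : j = ds.length - 1 := by omega
        exact hjv
    have : dayAt ds ds.length = last := by
      simp only [dayAt, if_neg (by omega : ¬ ds.length = 0)]
      rw [List.getD_eq_getElem ds 0 (by omega), htop]
    rw [this]

-- ===== VERDICT (by name: the statement is the Claim_ definition above) =====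
theorem min_cost_for_training_spec : Claim_equal_min_cost_for_training := by
  intro days costs _ hpre
  unfold Spec_min_cost_for_training
  rw [A_eq_G days costs hpre.1 hpre.2.1, B_eq_G days costs hpre.1 hpre.2.1]
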